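-- pv_equiv track=rewrite | github.com/FLOAT-0/Japanese-Study-Program | Main.py | expand_slashes
-- ===== SOURCE A (Python) =====
-- import itertools
--
-- def expand_slashes(text):
--     parts = text.split()
--
--     options = []
--     for part in parts:
--         if "/" in part:
--             options.append(part.split("/"))
--         else:
--             options.append([part])
--
--     return [" ".join(combo) for combo in itertools.product(*options)]
-- ===== SOURCE B (Python) =====
-- def expand_slashes(text):
--     # Mixed-radix indexing: count the combinations, then decode each index i
--     # into its choice digits (last token = least significant) and build the string.
--     opts = [part.split('/') for part in text.split()]
--     total = 1
--     for o in opts: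
--         total *= len(o)
--     out = []
--     for i in range(total):
--         words = []
--         rem = i
--         for o in reversed(opts):
--             rem, d = divmod(rem, len(o))
--             words.append(o[d])
--         words.reverse()
--         out.append(' '.join(words))
--     return out
-- ===== Notes on version B (the rewrite author's own statement) =====
-- stated objective: alternative
-- what changed: Replaces the collect-options-then-itertools.product pipeline with mixed-radix indexing: B counts the combinations (product of option counts) and decodes each index i in range(total) into its choice digits via divmod over the tokens, building each output string directly without any intermediate product list.
import Mathlib
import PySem

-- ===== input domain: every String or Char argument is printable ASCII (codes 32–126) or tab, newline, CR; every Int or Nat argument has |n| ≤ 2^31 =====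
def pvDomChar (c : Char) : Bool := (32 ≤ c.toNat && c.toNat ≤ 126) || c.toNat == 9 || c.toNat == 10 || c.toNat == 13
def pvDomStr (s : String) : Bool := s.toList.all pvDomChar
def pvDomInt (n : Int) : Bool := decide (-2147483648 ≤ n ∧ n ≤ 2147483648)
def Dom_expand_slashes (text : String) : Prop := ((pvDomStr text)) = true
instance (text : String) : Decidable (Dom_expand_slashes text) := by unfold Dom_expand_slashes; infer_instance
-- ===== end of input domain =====

-- B replaces the options-table + itertools.product + join pipeline by mixed-radix indexing:
-- it counts the combinations and decodes each index into its choice digits (alternative algorithm).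


-- s.split("/") for the literal non-empty separator "/": PySem.Str.split? is some here, exact
def pvSplitSlash (s : String) : List String := (PySem.Str.split? s "/").getD []

-- ===== PORT A =====
-- itertools.product over lists of strings (last factor varies fastest), the library call A makes
def pvProduct : List (List String) → List (List String)
  | [] => [[]]
  | o :: rest => o.flatMap (fun x => (pvProduct rest).map (fun c => x :: c))

def expand_slashes (text : String) : List String :=
  let parts := PySem.Str.split₀ text
  let options := parts.foldl (fun acc part =>
    if PySem.Str.isIn "/" part then acc ++ [pvSplitSlash part]
    else acc ++ [[part]]) []
  (pvProduct options).map (fun combo => PySem.Str.join " " combo)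

-- ===== PORT B =====
-- Source B's inner loop: rem, d = divmod(rem, len(o)); words.append(o[d]) over reversed(opts),
-- then words.reverse(). All operands are nonnegative, so Nat / and % match Python's divmod
-- exactly; o[d] is always in range in executions (d = rem % len(o) < len(o)), ported as getD.
def pvDigits (opts : List (List String)) (i : Nat) : List String :=
  (opts.reverse.foldl
    (fun (st : Nat × List String) o =>
      (st.1 / o.length, st.2 ++ [o.getD (st.1 % o.length) ""]))
    (i, [])).2.reverse

def expand_slashes_alt (text : String) : List String :=
  let opts := (PySem.Str.split₀ text).map (fun part => pvSplitSlash part)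
  let total := opts.foldl (fun t o => t * o.length) 1
  -- range(total) over nonnegative total = List.range, exact
  (List.range total).foldl
    (fun out i => out ++ [PySem.Str.join " " (pvDigits opts i)]) []

-- ===== PRECONDITION & SPEC =====
def Spec_expand_slashes (text : String) (out : List String) : Prop := out = expand_slashes_alt text
instance (text : String) (out : List String) : Decidable (Spec_expand_slashes text out) := by unfold Spec_expand_slashes; infer_instance

-- ===== CLAIM (what is proved, stated in full; the proofs are below) =====
def Claim_equal_expand_slashes : Prop := ∀ (text : String), Dom_expand_slashes text → Spec_expand_slashes text (expand_slashes text)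

-- ===== LEMMAS AND PROOFS =====
-- the radix product of a list of option lists
def pvRadix (opts : List (List String)) : Nat := (opts.map List.length).prod

-- structural (front-to-back, most significant digit first) mixed-radix decode
def pvSdec : List (List String) → Nat → List String
  | [], _ => []
  | o :: rest, i => o.getD (i / pvRadix rest) "" :: pvSdec rest (i % pvRadix rest)

theorem pvDigits_loop (l : List (List String)) (i : Nat) (ws : List String) :
    l.reverse.foldl
      (fun (st : Nat × List String) o =>
        (st.1 / o.length, st.2 ++ [o.getD (st.1 % o.length) ""]))
      (i, ws)
    = (i / pvRadix l, ws ++ (pvSdec l (i % pvRadix l)).reverse) := by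
  induction l generalizing i ws with
  | nil => simp [pvRadix, pvSdec]
  | cons o rest ih =>
      rw [List.reverse_cons, List.foldl_append, ih]
      simp only [List.foldl_cons, List.foldl_nil, pvSdec, pvRadix, List.map_cons,
        List.prod_cons, List.reverse_cons]
      have hA : i / (List.map List.length rest).prod / o.length
          = i / (o.length * (List.map List.length rest).prod) := by
        rw [Nat.div_div_eq_div_mul, Nat.mul_comm]
      have h1 : i % (o.length * (List.map List.length rest).prod) % (List.map List.length rest).prod
          = i % (List.map List.length rest).prod :=
        Nat.mod_mod_of_dvd i ⟨o.length, Nat.mul_comm _ _⟩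
      have h2 : i % (o.length * (List.map List.length rest).prod) / (List.map List.length rest).prod
          = i / (List.map List.length rest).prod % o.length := by
        rw [Nat.mul_comm o.length, Nat.mod_mul_right_div_self]
      rw [hA, h1, h2, List.append_assoc]

theorem pvDigits_eq_sdec (opts : List (List String)) (i : Nat) :
    pvDigits opts i = pvSdec opts (i % pvRadix opts) := by
  unfold pvDigits
  rw [pvDigits_loop]
  simp

theorem pvRange_mul_flatMap (a b : Nat) :
    List.range (a * b) = (List.range a).flatMap (fun q => (List.range b).map (fun r => q * b + r)) := by
  induction a with
  | zero => simp
  | succ a ih =>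
      rw [Nat.succ_mul, List.range_add, ih, List.range_succ, List.flatMap_append]
      simp [Nat.mul_comm]

theorem pvFlatMap_range_getD (o : List String) (g : String → List (List String)) :
    (List.range o.length).flatMap (fun q => g (o.getD q "")) = o.flatMap g := by
  induction o with
  | nil => simp
  | cons x xs ih =>
      rw [List.length_cons, List.range_succ_eq_map, List.flatMap_cons, List.flatMap_map]
      simp only [List.getD_cons_zero, List.getD_cons_succ]
      rw [ih, List.flatMap_cons]

theorem pvMap_sdec_range (opts : List (List String)) :
    (List.range (pvRadix opts)).map (pvSdec opts) = pvProduct opts := by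
  induction opts with
  | nil => simp [pvRadix, pvSdec, pvProduct]
  | cons o rest ih =>
      have hr : pvRadix (o :: rest) = o.length * pvRadix rest := by
        simp [pvRadix]
      rw [hr, pvRange_mul_flatMap, List.map_flatMap]
      have inner : ∀ q, ((List.range (pvRadix rest)).map (fun r => q * pvRadix rest + r)).map
          (pvSdec (o :: rest))
          = (pvProduct rest).map (fun c => o.getD q "" :: c) := by
        intro q
        rw [List.map_map, ← ih, List.map_map]
        apply List.map_congr_left
        intro r hr'
        have hrlt : r < pvRadix rest := List.mem_range.mp hr'
        have hpos : 0 < pvRadix rest := Nat.lt_of_le_of_lt (Nat.zero_le r) hrlt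
        simp only [Function.comp_apply, pvSdec]
        congr 1
        · congr 1
          rw [Nat.mul_comm q, Nat.mul_add_div hpos, Nat.div_eq_of_lt hrlt, Nat.add_zero]
        · congr 1
          rw [Nat.mul_comm q, Nat.mul_add_mod, Nat.mod_eq_of_lt hrlt]
      calc (List.range o.length).flatMap
            (fun q => ((List.range (pvRadix rest)).map (fun r => q * pvRadix rest + r)).map
              (pvSdec (o :: rest)))
          = (List.range o.length).flatMap
              (fun q => (pvProduct rest).map (fun c => o.getD q "" :: c)) := by
            rw [show (fun q => ((List.range (pvRadix rest)).map (fun r => q * pvRadix rest + r)).map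
              (pvSdec (o :: rest)))
              = (fun q => (pvProduct rest).map (fun c => o.getD q "" :: c)) from funext inner]
        _ = o.flatMap (fun x => (pvProduct rest).map (fun c => x :: c)) :=
            pvFlatMap_range_getD o (fun x => (pvProduct rest).map (fun c => x :: c))
        _ = pvProduct (o :: rest) := rfl

-- fuel-based splitOn on a string with NO occurrence of the (non-empty) separator returns [s]
theorem pvGo_no_occ (sep : List Char) :
    ∀ (fuel : Nat) (l cur : List Char) (acc : List (List Char)),
      l.length < fuel → (∀ j, ¬ sep <+: l.drop j) →
      PySem.Chars.splitOn.go sep fuel l cur acc = acc.reverse ++ [cur.reverse ++ l] := by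
  intro fuel
  induction fuel with
  | zero => intro l cur acc h; omega
  | succ fuel ih =>
      intro l cur acc hlen hno
      cases l with
      | nil => simp [PySem.Chars.splitOn.go]
      | cons c rest =>
          have hpref : sep.isPrefixOf (c :: rest) = false := by
            rw [← Bool.not_eq_true, List.isPrefixOf_iff_prefix]
            simpa using hno 0
          rw [PySem.Chars.splitOn.go, hpref]
          simp only [Bool.false_eq_true, if_false]
          rw [ih rest (c :: cur) acc (by simpa using Nat.lt_of_succ_lt_succ hlen)
            (fun j => by simpa using hno (j + 1))]
          simp

theorem pvSplitSlash_no_slash (p : String) (h : PySem.Str.isIn "/" p = false) :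
    pvSplitSlash p = [p] := by
  have hno : ∀ j, ¬ ('/' :: []) <+: p.toList.drop j := by
    intro j hj
    have h' : PySem.Chars.isIn ['/'] p.toList = false := by
      simpa [PySem.Str.isIn] using h
    exact ((PySem.Chars.isIn_eq_false_iff _ _).mp h')
      (hj.isInfix.trans (List.drop_suffix j p.toList).isInfix)
  unfold pvSplitSlash
  have : PySem.Str.split? p "/" = some [p] := by
    unfold PySem.Str.split?
    have hsep : ("/" : String).toList = ['/'] := rfl
    rw [hsep]
    unfold PySem.Chars.split?
    simp only [List.isEmpty_cons, if_false, Bool.false_eq_true]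
    unfold PySem.Chars.splitOn
    rw [pvGo_no_occ ['/'] (p.toList.length + 1) p.toList [] [] (Nat.lt_succ_self _) hno]
    simp
  rw [this]; rfl

theorem pvOptions_fold (parts : List String) (acc : List (List String)) :
    parts.foldl (fun acc part =>
      if PySem.Str.isIn "/" part then acc ++ [pvSplitSlash part]
      else acc ++ [[part]]) acc = acc ++ parts.map pvSplitSlash := by
  induction parts generalizing acc with
  | nil => simp
  | cons p parts ih =>
      rw [List.foldl_cons, ih]
      cases h : PySem.Str.isIn "/" p with
      | true => simp
      | false => simp [pvSplitSlash_no_slash p h]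

theorem pvFoldl_append_map {α β : Type} (f : α → β) (l : List α) (init : List β) :
    l.foldl (fun out i => out ++ [f i]) init = init ++ l.map f := by
  induction l generalizing init with
  | nil => simp
  | cons x xs ih => rw [List.foldl_cons, ih]; simp

theorem pvTotal_eq (opts : List (List String)) :
    opts.foldl (fun t o => t * o.length) 1 = pvRadix opts := by
  rw [pvRadix, List.prod_eq_foldl, List.foldl_map]

-- ===== VERDICT (by name: the statement is the Claim_ definition above) =====
theorem expand_slashes_spec : Claim_equal_expand_slashes := by
  intro text _
  unfold Spec_expand_slashes expand_slashes expand_slashes_alt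
  simp only [pvOptions_fold, List.nil_append, pvTotal_eq, pvFoldl_append_map]
  have key : ∀ (opts : List (List String)),
      (List.range (pvRadix opts)).map (fun i => PySem.Str.join " " (pvDigits opts i))
        = (pvProduct opts).map (fun combo => PySem.Str.join " " combo) := by
    intro opts
    rw [← pvMap_sdec_range, List.map_map]
    apply List.map_congr_left
    intro i hi
    simp only [Function.comp_apply]
    rw [pvDigits_eq_sdec, Nat.mod_eq_of_lt (List.mem_range.mp hi)]
  rw [key]
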